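-- pv_equiv track=rewrite | github.com/XiaoyuBook/auto-bdsp-rng | src/auto_bdsp_rng/ui/main_window.py | _compute_next_level
-- ===== SOURCE A (Python) =====
-- NATURE_MODIFIERS = (
--     (-1, -1),
--     (1, 2),
--     (1, 5),
--     (1, 3),
--     (1, 4),
--     (2, 1),
--     (-1, -1),
--     (2, 5),
--     (2, 3),
--     (2, 4),
--     (5, 1),
--     (5, 2),
--     (-1, -1),
--     (5, 3),
--     (5, 4),
--     (3, 1),
--     (3, 2),
--     (3, 5),
--     (-1, -1),
--     (3, 4),
--     (4, 1),
--     (4, 2),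
--     (4, 5),
--     (4, 3),
--     (-1, -1),
-- )
--
-- def _compute_stat(base, iv, lv, nature, stat_index):
--     if stat_index == 0:
--         s = ((2 * base + iv) * lv) // 100 + lv + 10
--     else:
--         s = ((2 * base + iv) * lv) // 100 + 5
--     if nature != 255:
--         increased, decreased = NATURE_MODIFIERS[nature]
--         if stat_index == increased:
--             s = (s * 110) // 100
--         elif stat_index == decreased:
--             s = (s * 90) // 100
--     return s
--
-- def _compute_next_level(base_stats, ivs, level, nature):
--     labels = ("HP", "攻击", "防御", "特攻", "特防", "速度")
--     result = [level] * 6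
--     for i in range(6):
--         if len(ivs[i]) < 2:
--             continue
--         for lv in range(level + 1, 101):
--             found = False
--             for j in range(1, len(ivs[i])):
--                 prev = _compute_stat(base_stats[i], ivs[i][j - 1], lv, nature, i)
--                 curr = _compute_stat(base_stats[i], ivs[i][j], lv, nature, i)
--                 if prev < curr:
--                     result[i] = lv
--                     found = True
--                     break
--             if found:
--                 break
--     return result
-- ===== SOURCE B (Python) =====
-- NATURE_MODIFIERS = (
--     (-1, -1),
--     (1, 2),
--     (1, 5),
--     (1, 3),
--     (1, 4),
--     (2, 1),
--     (-1, -1),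
--     (2, 5),
--     (2, 3),
--     (2, 4),
--     (5, 1),
--     (5, 2),
--     (-1, -1),
--     (5, 3),
--     (5, 4),
--     (3, 1),
--     (3, 2),
--     (3, 5),
--     (-1, -1),
--     (3, 4),
--     (4, 1),
--     (4, 2),
--     (4, 5),
--     (4, 3),
--     (-1, -1),
-- )
--
-- def _compute_stat(base, iv, lv, nature, stat_index):
--     if stat_index == 0:
--         s = ((2 * base + iv) * lv) // 100 + lv + 10
--     else:
--         s = ((2 * base + iv) * lv) // 100 + 5
--     if nature != 255:
--         increased, decreased = NATURE_MODIFIERS[nature]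
--         if stat_index == increased:
--             s = (s * 110) // 100
--         elif stat_index == decreased:
--             s = (s * 90) // 100
--     return s
--
-- def _compute_next_level(base_stats, ivs, level, nature):
--     # Pairs-outer decomposition: for each stat, for each adjacent IV pair find the
--     # first future level where that pair's stat increases, and keep the minimum
--     # over pairs (earliest level any pair increases = min over pairs of that
--     # pair's first increasing level).
--     result = []
--     for i in range(6):
--         col = ivs[i]
--         best = None
--         if len(col) >= 2:
--             for prev_iv, curr_iv in zip(col, col[1:]):
--                 for lv in range(level + 1, 101):
--                     if _compute_stat(base_stats[i], prev_iv, lv, nature, i) < _compute_stat(base_stats[i], curr_iv, lv, nature, i):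
--                         best = lv if best is None else min(best, lv)
--                         break
--         result.append(best if best is not None else level)
--     return result
-- ===== Notes on version B (the rewrite author's own statement) =====
-- stated objective: alternative
-- what changed: B inverts the nested traversal: instead of scanning levels outward and breaking at the first level where any adjacent IV pair increases, it scans each adjacent IV pair independently for its own first increasing level and takes the minimum over pairs (earliest level any pair increases = min over pairs of that pair's first increasing level), building the result list by append instead of in-place set on a preallocated list.
import Mathlib
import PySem

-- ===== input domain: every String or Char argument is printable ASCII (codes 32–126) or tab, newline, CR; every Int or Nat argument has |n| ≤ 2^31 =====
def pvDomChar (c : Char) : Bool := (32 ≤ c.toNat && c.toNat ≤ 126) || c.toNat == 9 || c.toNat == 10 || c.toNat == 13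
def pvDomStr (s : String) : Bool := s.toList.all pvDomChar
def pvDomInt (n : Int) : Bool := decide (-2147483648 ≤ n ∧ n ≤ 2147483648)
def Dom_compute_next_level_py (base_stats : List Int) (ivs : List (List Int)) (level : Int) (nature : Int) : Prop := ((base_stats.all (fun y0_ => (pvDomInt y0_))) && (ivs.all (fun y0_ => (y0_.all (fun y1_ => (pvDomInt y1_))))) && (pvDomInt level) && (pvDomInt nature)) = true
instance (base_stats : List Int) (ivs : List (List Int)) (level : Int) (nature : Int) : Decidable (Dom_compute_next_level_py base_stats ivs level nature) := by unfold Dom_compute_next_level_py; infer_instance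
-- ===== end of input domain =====

-- B changes the decomposition only (pairs-outer scan with a min accumulator instead of
-- levels-outer scan with a double break); same cost, equal return value.

-- shared module helper _compute_stat (identical in Source A and Source B)
def natureModifiers : List (Int × Int) :=
  [(-1,-1),(1,2),(1,5),(1,3),(1,4),(2,1),(-1,-1),(2,5),(2,3),(2,4),(5,1),(5,2),
   (-1,-1),(5,3),(5,4),(3,1),(3,2),(3,5),(-1,-1),(3,4),(4,1),(4,2),(4,5),(4,3),(-1,-1)]

def pyComputeStat (base iv lv nature : Int) (statIndex : Nat) : Int :=
  let s := if statIndex = 0 then PySem.Int.floordiv ((2 * base + iv) * lv) 100 + lv + 10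
           else PySem.Int.floordiv ((2 * base + iv) * lv) 100 + 5
  if nature ≠ 255 then
    let p := (PySem.List.pyGet? natureModifiers nature).getD (-1, -1)
    if (statIndex : Int) = p.1 then PySem.Int.floordiv (s * 110) 100
    else if (statIndex : Int) = p.2 then PySem.Int.floordiv (s * 90) 100
    else s
  else s

-- ===== PORT A =====
-- inner 'for j in range(1, len(ivs[i]))' with break (returns found)
def aPairLoop (base lv nature : Int) (i : Nat) (ivl : List Int) : List Nat → Bool
  | [] => false
  | j :: js =>
      if pyComputeStat base (ivl.getD (j - 1) 0) lv nature i < pyComputeStat base (ivl.getD j 0) lv nature i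
      then true else aPairLoop base lv nature i ivl js

-- 'for lv in range(level+1, 101)' with break; some lv = the value written into result[i]
def aLvLoop (base nature : Int) (i : Nat) (ivl : List Int) : List Int → Option Int
  | [] => none
  | lv :: rest =>
      if aPairLoop base lv nature i ivl (List.range' 1 (ivl.length - 1)) then some lv
      else aLvLoop base nature i ivl rest

def compute_next_level_py (base_stats : List Int) (ivs : List (List Int)) (level : Int) (nature : Int) : List Int :=
  (List.range 6).foldl
    (fun result i =>
      let ivl := ivs.getD i []
      if ivl.length < 2 then result
      else match aLvLoop (base_stats.getD i 0) nature i ivl (PySem.List.pyRange (level + 1) 101 1) with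
        | some lv => result.set i lv
        | none => result)
    (List.replicate 6 level)

-- ===== PORT B =====
-- first lv in the list at which this pair's stat increases (inner scan with break)
def bFirstLv (base nature : Int) (i : Nat) (p c : Int) : List Int → Option Int
  | [] => none
  | lv :: rest =>
      if pyComputeStat base p lv nature i < pyComputeStat base c lv nature i then some lv
      else bFirstLv base nature i p c rest

def bStatVal (base : Int) (ivl : List Int) (level nature : Int) (i : Nat) : Int :=
  if 2 ≤ ivl.length then
    let best := (ivl.zip (ivl.drop 1)).foldl
      (fun best pc =>
        match bFirstLv base nature i pc.1 pc.2 (PySem.List.pyRange (level + 1) 101 1) with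
        | none => best
        | some lv => match best with
          | none => some lv
          | some b => some (min b lv))
      none
    match best with
    | some lv => lv
    | none => level
  else level

def compute_next_level_py_alt (base_stats : List Int) (ivs : List (List Int)) (level : Int) (nature : Int) : List Int :=
  (List.range 6).map (fun i => bStatVal (base_stats.getD i 0) (ivs.getD i []) level nature i)

-- ===== PRECONDITION & SPEC =====
-- Exactly where Python A returns: ivs must have 6 columns (ivs[i] is always read), and every
-- stat whose inner loops actually run (≥2 IVs and level < 100) must have a base stat and a
-- nature index that does not raise IndexError in NATURE_MODIFIERS[nature] (255 skips the lookup,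
-- -25 ≤ nature < 25 indexes the 25-tuple, negative values Python-wrapping from the end).
def Pre_compute_next_level_py (base_stats : List Int) (ivs : List (List Int)) (level : Int) (nature : Int) : Prop :=
  6 ≤ ivs.length ∧
  ∀ i ∈ List.range 6, 2 ≤ (ivs.getD i []).length → level < 100 →
    (i < base_stats.length ∧ (nature = 255 ∨ (-25 ≤ nature ∧ nature < 25)))
instance (base_stats : List Int) (ivs : List (List Int)) (level : Int) (nature : Int) : Decidable (Pre_compute_next_level_py base_stats ivs level nature) := by unfold Pre_compute_next_level_py; infer_instance

def pvWitness_compute_next_level_py : List Int × List (List Int) × Int × Int :=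
  ([50, 60, 70, 80, 90, 100], [[0, 31], [5, 4], [], [7], [1, 2, 3], [31, 0]], 20, 3)

def Spec_compute_next_level_py (base_stats : List Int) (ivs : List (List Int)) (level : Int) (nature : Int) (out : List Int) : Prop := out = compute_next_level_py_alt base_stats ivs level nature
instance (base_stats : List Int) (ivs : List (List Int)) (level : Int) (nature : Int) (out : List Int) : Decidable (Spec_compute_next_level_py base_stats ivs level nature out) := by unfold Spec_compute_next_level_py; infer_instance

-- ===== CLAIM (what is proved, stated in full; the proofs are below) =====
def Claim_equal_compute_next_level_py : Prop := ∀ (base_stats : List Int) (ivs : List (List Int)) (level : Int) (nature : Int), Dom_compute_next_level_py base_stats ivs level nature → Pre_compute_next_level_py base_stats ivs level nature → Spec_compute_next_level_py base_stats ivs level nature (compute_next_level_py base_stats ivs level nature)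

-- ===== LEMMAS AND PROOFS =====

-- "some adjacent pair of the list satisfies f" (proof-side common form of both inner loops)
def pairAnyP (f : Int → Int → Bool) : List Int → Bool
  | a :: b :: t => f a b || pairAnyP f (b :: t)
  | _ => false

-- option-minimum (proof-side form of B's accumulator step)
def optMin : Option Int → Option Int → Option Int
  | none, o => o
  | o, none => o
  | some x, some y => some (min x y)

theorem optMin_none_right (o : Option Int) : optMin o none = o := by cases o <;> rfl

theorem optMin_assoc (o₁ o₂ o₃ : Option Int) :
    optMin (optMin o₁ o₂) o₃ = optMin o₁ (optMin o₂ o₃) := by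
  cases o₁ <;> cases o₂ <;> cases o₃ <;> simp [optMin, min_assoc]

theorem any_congr_mem {α : Type} {l : List α} {p q : α → Bool}
    (h : ∀ x ∈ l, p x = q x) : l.any p = l.any q := by
  induction l with
  | nil => rfl
  | cons a t ih =>
      simp only [List.any_cons, h a (List.mem_cons_self), ih (fun x hx => h x (List.mem_cons_of_mem a hx))]

theorem find?_congr_mem {α : Type} {l : List α} {p q : α → Bool}
    (h : ∀ x ∈ l, p x = q x) : l.find? p = l.find? q := by
  induction l with
  | nil => rfl
  | cons a t ih =>
      simp only [List.find?_cons, h a (List.mem_cons_self), ih (fun x hx => h x (List.mem_cons_of_mem a hx))]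

-- A's j-loop is an 'any' over the index list
theorem aPairLoop_eq_any (base lv nature : Int) (i : Nat) (ivl : List Int) (js : List Nat) :
    aPairLoop base lv nature i ivl js =
      js.any (fun j => pyComputeStat base (ivl.getD (j - 1) 0) lv nature i <
                       pyComputeStat base (ivl.getD j 0) lv nature i) := by
  induction js with
  | nil => rfl
  | cons j js ih =>
      simp only [aPairLoop, List.any_cons, ih]
      by_cases h : pyComputeStat base (ivl.getD (j - 1) 0) lv nature i <
          pyComputeStat base (ivl.getD j 0) lv nature i
      · rw [if_pos h, decide_eq_true h, Bool.true_or]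
      · rw [if_neg h, decide_eq_false h, Bool.false_or]

theorem any_range'_shift (g : Nat → Bool) (s n : Nat) :
    (List.range' (s + 1) n).any g = (List.range' s n).any (fun j => g (j + 1)) := by
  induction n generalizing s with
  | zero => rfl
  | succ n ih => simp [List.range'_succ, ih]

-- the indexed any over range' 1 (len-1) is pairAnyP
theorem any_range'_eq_pairAnyP (f : Int → Int → Bool) (a : Int) (t : List Int) :
    (List.range' 1 t.length).any
        (fun j => f ((a :: t).getD (j - 1) 0) ((a :: t).getD j 0)) = pairAnyP f (a :: t) := by
  induction t generalizing a with
  | nil => rfl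
  | cons b t ih =>
      show (List.range' 1 (t.length + 1)).any _ = _
      rw [List.range'_succ]
      simp only [List.any_cons]
      have h1 : (List.range' 2 t.length).any
          (fun j => f ((a :: b :: t).getD (j - 1) 0) ((a :: b :: t).getD j 0)) =
          (List.range' 1 t.length).any
          (fun j => f ((b :: t).getD (j - 1) 0) ((b :: t).getD j 0)) := by
        rw [any_range'_shift]
        refine any_congr_mem (fun j hj => ?_)
        have hj1 : 1 ≤ j := (List.mem_range'_1.mp hj).1
        have e1 : j + 1 - 1 = j := by omega
        have e2 : (a :: b :: t).getD (j + 1) 0 = (b :: t).getD j 0 := by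
          cases j with
          | zero => omega
          | succ k => rfl
        have e3 : (a :: b :: t).getD j 0 = (b :: t).getD (j - 1) 0 := by
          cases j with
          | zero => omega
          | succ k => simp
        rw [e1, e2, e3]
      rw [h1, ih]
      rfl

-- B's pair traversal is pairAnyP-shaped: zip with the tail enumerates adjacent pairs
theorem zip_drop_any (f : Int → Int → Bool) (l : List Int) :
    (l.zip (l.drop 1)).any (fun pc => f pc.1 pc.2) = pairAnyP f l := by
  induction l with
  | nil => rfl
  | cons a t ih =>
      cases t with
      | nil => rfl
      | cons b t' =>
          simp only [List.drop_one, List.tail_cons, List.zip_cons_cons, List.any_cons, pairAnyP]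
          rw [← ih]
          simp

-- first-match loops compute find?
theorem aLvLoop_eq_find? (base nature : Int) (i : Nat) (ivl : List Int) (L : List Int) :
    aLvLoop base nature i ivl L =
      L.find? (fun lv => aPairLoop base lv nature i ivl (List.range' 1 (ivl.length - 1))) := by
  induction L with
  | nil => rfl
  | cons lv rest ih =>
      simp only [aLvLoop, List.find?_cons]
      split_ifs with h <;> simp [h, ih]

theorem bFirstLv_eq_find? (base nature : Int) (i : Nat) (p c : Int) (L : List Int) :
    bFirstLv base nature i p c L =
      L.find? (fun lv => pyComputeStat base p lv nature i < pyComputeStat base c lv nature i) := by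
  induction L with
  | nil => rfl
  | cons lv rest ih =>
      simp only [bFirstLv, List.find?_cons]
      split_ifs with h <;> simp [h, ih]

-- find? on a strictly-increasing list distributes over disjunction as optMin
theorem find?_or (a b : Int → Bool) (L : List Int) (hL : L.Pairwise (· < ·)) :
    L.find? (fun x => a x || b x) = optMin (L.find? a) (L.find? b) := by
  induction L with
  | nil => rfl
  | cons x L' ih =>
      have hx : ∀ y ∈ L', x < y := fun y hy => (List.pairwise_cons.mp hL).1 y hy
      have hL' := (List.pairwise_cons.mp hL).2
      have hmem : ∀ (p : Int → Bool) y, L'.find? p = some y → x < y := by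
        intro p y hy
        exact hx y (List.mem_of_find?_eq_some hy)
      simp only [List.find?_cons]
      by_cases ha : a x <;> by_cases hb : b x
      · simp [ha, hb, optMin]
      · simp only [ha, hb, Bool.true_or]
        cases h : L'.find? b with
        | none => simp [optMin_none_right]
        | some y => simp [optMin, min_eq_left (le_of_lt (hmem b y h))]
      · simp only [ha, hb, Bool.false_or]
        cases h : L'.find? a with
        | none => simp [optMin]
        | some y => simp [optMin, min_eq_right (le_of_lt (hmem a y h))]
      · simp only [ha, hb, Bool.false_or]
        exact ih hL'

theorem fold_optMin_eq_find? {α : Type} (g : Int → α → Bool) (find1 : α → Option Int)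
    (L : List Int) (hL : L.Pairwise (· < ·)) (hfind : ∀ p, find1 p = L.find? (fun x => g x p))
    (ps : List α) :
    ps.foldl (fun acc p => optMin acc (find1 p)) none =
      L.find? (fun x => ps.any (fun p => g x p)) := by
  induction ps with
  | nil => exact (List.find?_eq_none.mpr (fun x _ => by simp)).symm
  | cons p ps ih =>
      have hshift : ∀ (os : List α) (acc : Option Int),
          os.foldl (fun a q => optMin a (find1 q)) acc =
            optMin acc (os.foldl (fun a q => optMin a (find1 q)) none) := by
        intro os
        induction os with
        | nil => intro acc; simp [optMin_none_right]
        | cons o os ih2 =>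
            intro acc
            simp only [List.foldl_cons]
            rw [show optMin none (find1 o) = find1 o from by cases find1 o <;> rfl,
              ih2 (optMin acc (find1 o)), ih2 (find1 o), ← optMin_assoc]
      rw [List.foldl_cons, hshift,
        show optMin none (find1 p) = find1 p from by cases find1 p <;> rfl,
        ih, hfind p, ← find?_or _ _ L hL]
      refine find?_congr_mem (fun x _ => ?_)
      simp

-- per-stat equality of the two decompositions
set_option maxHeartbeats 1000000 in
theorem perStat (base level nature : Int) (i : Nat) (ivl : List Int) :
    (if ivl.length < 2 then level
     else match aLvLoop base nature i ivl (PySem.List.pyRange (level + 1) 101 1) with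
       | some lv => lv
       | none => level) = bStatVal base ivl level nature i := by
  by_cases hlen : ivl.length < 2
  · simp [bStatVal, hlen, show ¬ 2 ≤ ivl.length from by omega]
  · obtain ⟨a, t, rfl⟩ : ∃ a t, ivl = a :: t := by
      cases ivl with
      | nil => simp at hlen
      | cons a t => exact ⟨a, t, rfl⟩
    have h2 : 2 ≤ (a :: t).length := Nat.not_lt.mp hlen
    set L := PySem.List.pyRange (level + 1) 101 1 with hLdef
    have hLpw : L.Pairwise (· < ·) := PySem.List.pairwise_lt_pyRange_one _ _
    -- A side to find? of pairAnyP
    have hA : aLvLoop base nature i (a :: t) L =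
        L.find? (fun lv => pairAnyP
          (fun p c => pyComputeStat base p lv nature i < pyComputeStat base c lv nature i)
          (a :: t)) := by
      rw [aLvLoop_eq_find?]
      refine find?_congr_mem (fun lv _ => ?_)
      rw [aPairLoop_eq_any]
      have hl1 : (a :: t).length - 1 = t.length := by simp
      rw [hl1, any_range'_eq_pairAnyP
        (fun p c => decide (pyComputeStat base p lv nature i < pyComputeStat base c lv nature i)) a t]
    -- B side to the same find?
    have hB : ((a :: t).zip ((a :: t).drop 1)).foldl
        (fun best pc =>
          match bFirstLv base nature i pc.1 pc.2 L with
          | none => best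
          | some lv => match best with
            | none => some lv
            | some b => some (min b lv)) none =
        L.find? (fun lv => pairAnyP
          (fun p c => pyComputeStat base p lv nature i < pyComputeStat base c lv nature i)
          (a :: t)) := by
      have h1 : (fun (best : Option Int) (pc : Int × Int) =>
          match bFirstLv base nature i pc.1 pc.2 L with
          | none => best
          | some lv => match best with
            | none => some lv
            | some b => some (min b lv)) =
          fun (best : Option Int) (pc : Int × Int) =>
            optMin best (bFirstLv base nature i pc.1 pc.2 L) := by
        funext best pc
        cases bFirstLv base nature i pc.1 pc.2 L <;> cases best <;> rfl
      have hfind : ∀ pc : Int × Int, bFirstLv base nature i pc.1 pc.2 L =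
          L.find? (fun lv => pyComputeStat base pc.1 lv nature i <
            pyComputeStat base pc.2 lv nature i) :=
        fun pc => bFirstLv_eq_find? base nature i pc.1 pc.2 L
      rw [h1, fold_optMin_eq_find? _ _ L hLpw hfind ((a :: t).zip ((a :: t).drop 1))]
      refine find?_congr_mem (fun lv _ => ?_)
      rw [zip_drop_any
        (fun p c => decide (pyComputeStat base p lv nature i < pyComputeStat base c lv nature i))]
    rw [if_neg hlen, hA]
    simp only [bStatVal, if_pos h2]
    rw [← hLdef, hB]

-- the A-side fold over range 6 updates each slot independently
theorem foldA_getD (base_stats : List Int) (ivs : List (List Int)) (level nature : Int) (n : Nat) :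
    ((List.range n).foldl
      (fun result i =>
        let ivl := ivs.getD i []
        if ivl.length < 2 then result
        else match aLvLoop (base_stats.getD i 0) nature i ivl (PySem.List.pyRange (level + 1) 101 1) with
          | some lv => result.set i lv
          | none => result)
      (List.replicate 6 level)).length = 6 ∧
    ∀ idx : Nat, idx < 6 →
      ((List.range n).foldl
        (fun result i =>
          let ivl := ivs.getD i []
          if ivl.length < 2 then result
          else match aLvLoop (base_stats.getD i 0) nature i ivl (PySem.List.pyRange (level + 1) 101 1) with
            | some lv => result.set i lv
            | none => result)
        (List.replicate 6 level)).getD idx 0 =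
      if idx < n then
        (if (ivs.getD idx []).length < 2 then level
         else match aLvLoop (base_stats.getD idx 0) nature idx (ivs.getD idx [])
                (PySem.List.pyRange (level + 1) 101 1) with
           | some lv => lv
           | none => level)
      else level := by
  induction n with
  | zero =>
      refine ⟨by simp, fun idx hidx => ?_⟩
      rw [List.range_zero, List.foldl_nil, if_neg (by omega : ¬ idx < 0),
        List.getD_eq_getElem?_getD, List.getElem?_replicate, if_pos hidx]
      rfl
  | succ n ih =>
      obtain ⟨ihlen, ihget⟩ := ih
      rw [List.range_succ, List.foldl_append]
      simp only [List.foldl_cons, List.foldl_nil]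
      set R := (List.range n).foldl _ (List.replicate 6 level) with hR
      constructor
      · split_ifs with h
        · exact ihlen
        · cases aLvLoop (base_stats.getD n 0) nature n (ivs.getD n []) (PySem.List.pyRange (level + 1) 101 1) <;>
            simp [ihlen]
      · intro idx hidx
        by_cases hlt : (ivs.getD n []).length < 2
        · rw [if_pos hlt, ihget idx hidx]
          by_cases he : idx = n
          · subst he
            rw [if_neg (lt_irrefl idx), if_pos (Nat.lt_succ_self idx), if_pos hlt]
          · have : idx < n + 1 ↔ idx < n := by omega
            simp [this]
        · rw [if_neg hlt]
          cases h : aLvLoop (base_stats.getD n 0) nature n (ivs.getD n []) (PySem.List.pyRange (level + 1) 101 1) with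
          | none =>
              rw [ihget idx hidx]
              by_cases he : idx = n
              · subst he
                rw [if_neg (lt_irrefl idx), if_pos (Nat.lt_succ_self idx), if_neg hlt, h]
              · have : idx < n + 1 ↔ idx < n := by omega
                simp [this]
          | some lv =>
              by_cases he : idx = n
              · subst he
                have : (R.set idx lv).getD idx 0 = lv := by
                  have hlenR : idx < R.length := by omega
                  simp [List.getD_eq_getElem?_getD, hlenR]
                rw [this, if_pos (Nat.lt_succ_self idx), if_neg hlt, h]
              · have : (R.set n lv).getD idx 0 = R.getD idx 0 := by
                  simp [List.getD_eq_getElem?_getD, List.getElem?_set_ne (by omega : n ≠ idx)]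
                rw [this, ihget idx hidx]
                have : idx < n + 1 ↔ idx < n := by omega
                simp [this]

-- ===== VERDICT (by name: the statement is the Claim_ definition above) =====
theorem compute_next_level_py_spec : Claim_equal_compute_next_level_py := by
  intro base_stats ivs level nature _hDom _hPre
  show compute_next_level_py base_stats ivs level nature = compute_next_level_py_alt base_stats ivs level nature
  obtain ⟨hlen, hget⟩ := foldA_getD base_stats ivs level nature 6
  apply List.ext_getElem
  · have halt : (compute_next_level_py_alt base_stats ivs level nature).length = 6 := by
      simp [compute_next_level_py_alt]
    exact hlen.trans halt.symm
  · intro idx h1 h2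
    have hidx : idx < 6 := by
      simpa [compute_next_level_py_alt] using h2
    have hA : (compute_next_level_py base_stats ivs level nature)[idx] =
        (compute_next_level_py base_stats ivs level nature).getD idx 0 := by
      rw [List.getD_eq_getElem?_getD, List.getElem?_eq_getElem h1]
      rfl
    rw [hA]
    show ((List.range 6).foldl _ (List.replicate 6 level)).getD idx 0 = _
    rw [hget idx hidx, if_pos hidx,
      perStat (base_stats.getD idx 0) level nature idx (ivs.getD idx [])]
    simp [compute_next_level_py_alt]
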